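-- pv_equiv track=rewrite | github.com/fabranx/AdventOfCode | event3/event3_part1.py | findAllNumbers
-- ===== SOURCE A (Python) =====
-- def findAllNumbers(lines):
--     found = []
--     WIDTH = len(lines)
--     for row in range(WIDTH):
--         num = ''
--         startnum = None
--         for column in range(WIDTH):
--             if lines[row][column].isdigit():
--                 if not startnum:
--                     startnum = (row, column)
--                 num += lines[row][column]
--             else:
--                 if num:
--                     found.append((num, startnum))
--                 num = ''
--                 startnum = None
--
--             if column == WIDTH - 1:  # last character of the row
--                 if num:
--                     found.append((num, startnum))
--     return found
-- ===== SOURCE B (Python) =====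
-- def findAllNumbers(lines):
--     n = len(lines)
--     found = []
--     for row in range(n):
--         chars = [lines[row][c] for c in range(n)]
--         col = 0
--         while col < n:
--             if chars[col].isdigit():
--                 start = col
--                 while col < n and chars[col].isdigit():
--                     col += 1
--                 found.append((''.join(chars[start:col]), (row, start)))
--             else:
--                 col += 1
--     return found
-- ===== Notes on version B (the rewrite author's own statement) =====
-- stated objective: simpler
-- what changed: A's per-character state machine (pending digit string, start marker, reset on non-digit, special end-of-row flush inside the loop) is replaced by a two-pointer run scanner per row: find a digit, skip the whole digit run, emit the slice and its start column in one step, with no carried state and no last-column special case.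
import Mathlib
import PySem

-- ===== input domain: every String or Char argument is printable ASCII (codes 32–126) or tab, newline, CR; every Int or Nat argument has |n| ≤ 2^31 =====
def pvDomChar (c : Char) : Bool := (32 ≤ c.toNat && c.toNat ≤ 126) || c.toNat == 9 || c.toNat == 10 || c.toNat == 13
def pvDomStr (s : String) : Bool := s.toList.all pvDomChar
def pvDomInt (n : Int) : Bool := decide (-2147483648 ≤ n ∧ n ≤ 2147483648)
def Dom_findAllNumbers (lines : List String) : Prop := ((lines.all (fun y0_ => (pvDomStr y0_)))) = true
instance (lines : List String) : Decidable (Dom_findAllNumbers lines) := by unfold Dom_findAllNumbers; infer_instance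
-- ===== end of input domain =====

-- B replaces A's per-character state machine (pending digit string + start marker + end-of-row
-- flush) by a two-pointer run scanner per row (objective: simpler). Return value only; no mutation.

-- shared accessor: the transliteration of the expression `lines[row][column]` that both Pythons
-- contain; the .getD defaults are unreachable under Pre_ (Python raises IndexError there).
-- `lines[row][column]` is a 1-char string; `.isdigit()` on it is `PySem.Chars.isdigit` of the char.
def chAt (lines : List String) (row column : Int) : Char :=
  (PySem.Str.pyGet? ((PySem.List.pyGet? lines row).getD "") column).getD ' '

-- ===== PORT A =====
-- one iteration of A's inner `for column in range(WIDTH)` loop; state = (found, num, startnum)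
def stepA (lines : List String) (W row : Int)
    (st : List (String × (Int × Int)) × List Char × Option (Int × Int)) (column : Int) :
    List (String × (Int × Int)) × List Char × Option (Int × Int) :=
  let found := st.1
  let num := st.2.1
  let startnum := st.2.2
  let (found, num, startnum) :=
    if PySem.Chars.isdigit (chAt lines row column) then
      (found, num ++ [chAt lines row column],
        if startnum = none then some (row, column) else startnum)
    else
      ((if num ≠ [] then found ++ [(String.ofList num, startnum.getD (0, 0))] else found),
        ([] : List Char), (none : Option (Int × Int)))
  if column = W - 1 then  -- last character of the row
    ((if num ≠ [] then found ++ [(String.ofList num, startnum.getD (0, 0))] else found), num, startnum)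
  else
    (found, num, startnum)

def findAllNumbers (lines : List String) : List (String × (Int × Int)) :=
  let W : Int := lines.length
  (PySem.List.pyRange 0 W 1).foldl
    (fun found row =>
      ((PySem.List.pyRange 0 W 1).foldl (stepA lines W row)
        (found, ([] : List Char), (none : Option (Int × Int)))).1)
    []

-- ===== PORT B =====
-- B's `while col < n` two-pointer scan over the remaining suffix of the row's char list;
-- the inner `while … isdigit` that advances `col` past the run is takeWhile/dropWhile, and
-- `''.join(chars[start:col])` is the run it skipped.
def scanRowB (row : Int) (idx : Int) (cs : List Char) : List (String × (Int × Int)) :=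
  match cs with
  | [] => []
  | c :: rest =>
    if PySem.Chars.isdigit c then
      let run := rest.takeWhile PySem.Chars.isdigit
      (String.ofList (c :: run), (row, idx)) ::
        scanRowB row (idx + 1 + run.length) (rest.dropWhile PySem.Chars.isdigit)
    else
      scanRowB row (idx + 1) rest
termination_by cs.length
decreasing_by
  · have := List.length_dropWhile_le PySem.Chars.isdigit rest
    simp; omega
  · simp

def findAllNumbers_alt (lines : List String) : List (String × (Int × Int)) :=
  let n : Int := lines.length
  (PySem.List.pyRange 0 n 1).foldl
    (fun found row =>
      found ++ scanRowB row 0 ((PySem.List.pyRange 0 n 1).map (chAt lines row)))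
    []

-- ===== PRECONDITION & SPEC =====
-- Pre_ = exactly the inputs where Python A returns: every row must have at least len(lines)
-- characters (A reads lines[row][column] for row, column < len(lines); shorter rows IndexError).
def Pre_findAllNumbers (lines : List String) : Prop :=
  ∀ s ∈ lines, lines.length ≤ s.toList.length
instance (lines : List String) : Decidable (Pre_findAllNumbers lines) := by
  unfold Pre_findAllNumbers; infer_instance

def pvWitness_findAllNumbers : List String := ["17.", "3a4", "..5"]

def Spec_findAllNumbers (lines : List String) (out : List (String × (Int × Int))) : Prop := out = findAllNumbers_alt lines
instance (lines : List String) (out : List (String × (Int × Int))) : Decidable (Spec_findAllNumbers lines out) := by unfold Spec_findAllNumbers; infer_instance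

-- ===== CLAIM (what is proved, stated in full; the proofs are below) =====
def Claim_equal_findAllNumbers : Prop := ∀ (lines : List String), Dom_findAllNumbers lines → Pre_findAllNumbers lines → Spec_findAllNumbers lines (findAllNumbers lines)

-- ===== LEMMAS AND PROOFS =====

-- A's inner-loop body without the last-column flush
def stepN (lines : List String) (row : Int)
    (st : List (String × (Int × Int)) × List Char × Option (Int × Int)) (column : Int) :
    List (String × (Int × Int)) × List Char × Option (Int × Int) :=
  if PySem.Chars.isdigit (chAt lines row column) then
    (st.1, st.2.1 ++ [chAt lines row column],
      if st.2.2 = none then some (row, column) else st.2.2)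
  else
    ((if st.2.1 ≠ [] then st.1 ++ [(String.ofList st.2.1, st.2.2.getD (0, 0))] else st.1),
      ([] : List Char), (none : Option (Int × Int)))

-- the end-of-row flush, applied to a state
def flushF (st : List (String × (Int × Int)) × List Char × Option (Int × Int)) :
    List (String × (Int × Int)) :=
  if st.2.1 ≠ [] then st.1 ++ [(String.ofList st.2.1, st.2.2.getD (0, 0))] else st.1

theorem stepA_eq (lines : List String) (W row : Int) (st) (column : Int) :
    stepA lines W row st column =
      if column = W - 1 then
        (flushF (stepN lines row st column), (stepN lines row st column).2)
      else stepN lines row st column := by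
  unfold stepA stepN flushF
  by_cases h : PySem.Chars.isdigit (chAt lines row column) <;> simp [h]

-- the state machine, run to the end of the row and then flushed, in recursive form
def scanCont (row : Int) (j : Int) (num : List Char) (start : Option (Int × Int))
    (cs : List Char) : List (String × (Int × Int)) :=
  match cs with
  | [] => if num ≠ [] then [(String.ofList num, start.getD (0, 0))] else []
  | c :: rest =>
    if PySem.Chars.isdigit c then
      scanCont row (j + 1) (num ++ [c]) (if start = none then some (row, j) else start) rest
    else
      (if num ≠ [] then [(String.ofList num, start.getD (0, 0))] else []) ++
        scanCont row (j + 1) [] none rest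

-- flush ∘ (fold of stepN over pyRange a b 1)  =  scanCont over the corresponding char list
theorem foldN_eq_scanCont (lines : List String) (row : Int) :
    ∀ (n : Nat) (a b : Int), n = (b - a).toNat →
      ∀ (found : List (String × (Int × Int))) (num : List Char) (start : Option (Int × Int)),
        flushF ((PySem.List.pyRange a b 1).foldl (stepN lines row) (found, num, start)) =
          found ++ scanCont row a num start ((PySem.List.pyRange a b 1).map (chAt lines row)) := by
  intro n
  induction n with
  | zero =>
    intro a b h found num start
    rw [PySem.List.pyRange_one_eq_nil (by omega)]
    simp only [List.foldl_nil, List.map_nil, scanCont, flushF]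
    split <;> simp
  | succ m ih =>
    intro a b h found num start
    rw [PySem.List.pyRange_one_cons (by omega)]
    simp only [List.foldl_cons, List.map_cons]
    rw [show ((PySem.List.pyRange (a+1) b 1).foldl (stepN lines row)
          (stepN lines row (found, num, start) a)) =
        ((PySem.List.pyRange (a+1) b 1).foldl (stepN lines row)
          ((stepN lines row (found, num, start) a).1,
           (stepN lines row (found, num, start) a).2.1,
           (stepN lines row (found, num, start) a).2.2)) from rfl]
    rw [ih (a + 1) b (by omega)]
    conv_rhs => rw [scanCont]
    by_cases h1 : PySem.Chars.isdigit (chAt lines row a)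
    · simp only [stepN, h1, if_true]
    · simp only [stepN, h1, if_false, Bool.false_eq_true]
      by_cases h2 : num = [] <;> simp [h2]

-- scanCont with an empty pending run is exactly B's scanner; with a pending run it emits the
-- merged run first.  Proved together by induction on the char list.
theorem scanCont_spec (row : Int) :
    ∀ (cs : List Char),
      (∀ (j : Int) (num : List Char) (p : Int × Int), num ≠ [] →
        scanCont row j num (some p) cs =
          (String.ofList (num ++ cs.takeWhile PySem.Chars.isdigit), p) ::
            scanRowB row (j + (cs.takeWhile PySem.Chars.isdigit).length)
              (cs.dropWhile PySem.Chars.isdigit)) ∧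
      (∀ (j : Int), scanCont row j [] none cs = scanRowB row j cs) := by
  intro cs
  induction cs with
  | nil =>
    constructor
    · intro j num p hnum
      simp [scanCont, scanRowB, hnum]
    · intro j
      simp [scanCont, scanRowB]
  | cons c rest ih =>
    constructor
    · intro j num p hnum
      by_cases h1 : PySem.Chars.isdigit c
      · rw [scanCont]
        simp only [h1, if_true, List.takeWhile_cons_of_pos h1, List.dropWhile_cons_of_pos h1]
        rw [if_neg (by simp)]
        rw [ih.1 (j + 1) (num ++ [c]) p (by simp)]
        have e1 : num ++ [c] ++ rest.takeWhile PySem.Chars.isdigit =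
            num ++ c :: rest.takeWhile PySem.Chars.isdigit := by simp
        have e2 : j + 1 + ((rest.takeWhile PySem.Chars.isdigit).length : Int) =
            j + (((c :: rest.takeWhile PySem.Chars.isdigit).length : Nat) : Int) := by
          simp; ring
        rw [e1, e2]
      · rw [scanCont]
        simp only [h1, List.takeWhile_cons_of_neg h1, List.dropWhile_cons_of_neg h1]
        simp only [hnum, ne_eq, not_false_iff, if_true]
        rw [ih.2 (j + 1)]
        rw [scanRowB]
        simp [h1]
    · intro j
      by_cases h1 : PySem.Chars.isdigit c
      · rw [scanCont]
        simp only [h1, if_true]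
        rw [show ([] : List Char) ++ [c] = [c] from rfl]
        rw [ih.1 (j + 1) [c] (row, j) (by simp)]
        rw [scanRowB]
        simp only [h1, if_true]
        simp
      · rw [scanCont, scanRowB]
        simp [h1, ih.2 (j + 1)]

-- one row of A equals one row of B
theorem row_eq (lines : List String) (W row : Int)
    (found : List (String × (Int × Int))) :
    ((PySem.List.pyRange 0 W 1).foldl (stepA lines W row)
        (found, ([] : List Char), (none : Option (Int × Int)))).1 =
      found ++ scanRowB row 0 ((PySem.List.pyRange 0 W 1).map (chAt lines row)) := by
  by_cases hpos : 0 < W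
  · -- split off the last column, where the flush fires
    have hsplit : PySem.List.pyRange 0 W 1 = PySem.List.pyRange 0 (W - 1) 1 ++ [W - 1] := by
      rw [show W = (W - 1) + 1 by omega, PySem.List.pyRange_one_succ_right (by omega)]
      simp
    have hcongr := PySem.List.foldl_congr_mem (PySem.List.pyRange 0 (W - 1) 1)
      (stepA lines W row) (stepN lines row)
      (found, ([] : List Char), (none : Option (Int × Int)))
      (by
        intro acc j hj
        rw [PySem.List.mem_pyRange_one] at hj
        rw [stepA_eq]
        simp [show ¬ (j = W - 1) by omega])
    rw [hsplit, List.foldl_append, hcongr]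
    simp only [List.foldl_cons, List.foldl_nil]
    rw [stepA_eq, if_pos rfl]
    have hlast : stepN lines row
        (List.foldl (stepN lines row)
          (found, ([] : List Char), (none : Option (Int × Int)))
          (PySem.List.pyRange 0 (W - 1) 1)) (W - 1) =
        List.foldl (stepN lines row)
          (found, ([] : List Char), (none : Option (Int × Int)))
          (PySem.List.pyRange 0 W 1) := by
      rw [hsplit, List.foldl_append]
      simp
    show flushF (stepN lines row
        (List.foldl (stepN lines row)
          (found, ([] : List Char), (none : Option (Int × Int)))
          (PySem.List.pyRange 0 (W - 1) 1)) (W - 1)) = _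
    rw [hlast]
    rw [foldN_eq_scanCont lines row (W - 0).toNat 0 W rfl found [] none]
    rw [(scanCont_spec row _).2 0]
    rw [← hsplit]
  · rw [PySem.List.pyRange_one_eq_nil (by omega)]
    simp [scanRowB]

-- ===== VERDICT (by name: the statement is the Claim_ definition above) =====
theorem findAllNumbers_spec : Claim_equal_findAllNumbers := by
  intro lines _ _
  unfold Spec_findAllNumbers findAllNumbers findAllNumbers_alt
  refine PySem.List.foldl_congr_mem _ _ _ _ ?_
  intro acc row _
  exact row_eq lines (lines.length : Int) row acc
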